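-- pv_equiv track=rewrite | github.com/barry800414/master_thesis | feature/media.py | getMediaMap
-- ===== SOURCE A (Python) =====
-- def getMediaMap(lnListInTopic):
--     mediaMap = dict()
--     for topicId, lnList in lnListInTopic.items():
--         for ln in lnList:
--             media = getMedia(ln['news_id'])
--             if media not in mediaMap:
--                 mediaMap[media] = len(mediaMap)
--     return mediaMap
--
-- def getMedia(newsId):
--     return newsId[0:newsId.rfind('_')]
-- ===== SOURCE B (Python) =====
-- def getMediaMap(lnListInTopic):
--     # set + sort-by-first-occurrence: flatten to the media sequence, take its set,
--     # order the distinct medias by the position of their first occurrence in the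
--     # sequence (seq.index is injective on set(seq), so the result is deterministic),
--     # then pair each with its rank.
--     seq = [getMedia(ln['news_id'])
--            for lnList in lnListInTopic.values()
--            for ln in lnList]
--     uniq = sorted(set(seq), key=seq.index)
--     return {m: i for i, m in enumerate(uniq)}
--
-- def getMedia(newsId):
--     return newsId[0:newsId.rfind('_')]
-- ===== Notes on version B (the rewrite author's own statement) =====
-- stated objective: alternative
-- what changed: Replaces A's single pass that maintains the map and an inline membership test by a set + sort-based algorithm: flatten to the media sequence, take its set, sort the distinct medias by first-occurrence position (seq.index), then enumerate the sorted list.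
import Mathlib
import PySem

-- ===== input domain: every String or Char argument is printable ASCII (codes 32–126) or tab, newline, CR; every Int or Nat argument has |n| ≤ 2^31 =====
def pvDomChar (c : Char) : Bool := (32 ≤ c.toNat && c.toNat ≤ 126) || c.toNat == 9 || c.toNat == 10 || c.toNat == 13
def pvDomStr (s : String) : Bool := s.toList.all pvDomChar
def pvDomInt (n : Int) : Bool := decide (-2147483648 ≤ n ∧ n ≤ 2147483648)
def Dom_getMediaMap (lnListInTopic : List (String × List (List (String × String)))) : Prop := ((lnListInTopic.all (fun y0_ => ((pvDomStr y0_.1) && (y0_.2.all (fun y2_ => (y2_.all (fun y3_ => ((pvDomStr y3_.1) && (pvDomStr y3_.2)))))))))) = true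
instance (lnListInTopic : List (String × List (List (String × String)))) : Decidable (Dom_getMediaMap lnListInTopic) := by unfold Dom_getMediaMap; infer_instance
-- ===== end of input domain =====

-- B replaces A's inline maintain-the-map loop by a set + sort-by-first-occurrence algorithm (flatten, set, sort by seq.index, enumerate); alternative decomposition, same results.


-- ===== PORT A =====
-- getMedia(newsId) = newsId[0:newsId.rfind('_')]  (shared helper of both Python files)
def getMedia (newsId : String) : String :=
  PySem.Str.slice newsId (some 0) (some (PySem.Str.rfind newsId "_"))

def getMediaMap (lnListInTopic : List (String × List (List (String × String)))) : List (String × Int) :=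
  lnListInTopic.foldl (fun mediaMap t =>
    t.2.foldl (fun mediaMap ln =>
      let media := getMedia ((PySem.Dict.mk ln).getD "news_id" "")
      if (mediaMap.map (·.1)).contains media then mediaMap
      else mediaMap ++ [(media, (mediaMap.length : Int))]) mediaMap) []

-- ===== PORT B =====
def getMediaMap_alt (lnListInTopic : List (String × List (List (String × String)))) : List (String × Int) :=
  let seq := lnListInTopic.flatMap (fun t =>
    t.2.map (fun ln => getMedia ((PySem.Dict.mk ln).getD "news_id" "")))
  -- sorted(set(seq), key=seq.index): seq.index never raises here (every m ∈ seq), so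
  -- '(index? seq m).getD 0' is exact; the key is injective on the set, so the sort's
  -- result does not depend on the set's iteration order.
  let uniq := PySem.List.sorted (PySem.Set.ofList seq)
      (fun m => ((PySem.List.index? seq m).getD 0 : Nat)) false
  (PySem.List.enumerate uniq 0).map (fun p => (p.2, p.1))

-- ===== PRECONDITION & SPEC =====
-- Pre_ excludes exactly the inputs on which A raises KeyError: some ln lacks the key "news_id".
def Pre_getMediaMap (lnListInTopic : List (String × List (List (String × String)))) : Prop :=
  ∀ t ∈ lnListInTopic, ∀ ln ∈ t.2, (ln.map (·.1)).contains "news_id" = true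
instance (lnListInTopic : List (String × List (List (String × String)))) : Decidable (Pre_getMediaMap lnListInTopic) := by unfold Pre_getMediaMap; infer_instance

def pvWitness_getMediaMap : (List (String × List (List (String × String)))) :=
  [("t1", [[("news_id", "apple_1")], [("news_id", "bbc_2")]]), ("t2", [[("news_id", "apple_9")]])]

def Spec_getMediaMap (lnListInTopic : List (String × List (List (String × String)))) (out : List (String × Int)) : Prop := out = getMediaMap_alt lnListInTopic
instance (lnListInTopic : List (String × List (List (String × String)))) (out : List (String × Int)) : Decidable (Spec_getMediaMap lnListInTopic out) := by unfold Spec_getMediaMap; infer_instance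

-- ===== CLAIM (what is proved, stated in full; the proofs are below) =====
def Claim_equal_getMediaMap : Prop := ∀ (lnListInTopic : List (String × List (List (String × String)))), Dom_getMediaMap lnListInTopic → Pre_getMediaMap lnListInTopic → Spec_getMediaMap lnListInTopic (getMediaMap lnListInTopic)

-- ===== LEMMAS AND PROOFS =====

-- the media extracted from one ln
def pvMediaOf (ln : List (String × String)) : String :=
  getMedia ((PySem.Dict.mk ln).getD "news_id" "")

-- A's loop body on the flat media sequence
def pvStep (acc : List (String × Int)) (m : String) : List (String × Int) :=
  if (acc.map (·.1)).contains m then acc else acc ++ [(m, (acc.length : Int))]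

-- pairing of a list with ranks (the shape both sides reduce to)
def pvIdx (u : List String) : List (String × Int) :=
  (PySem.List.enumerate u 0).map (fun p => (p.2, p.1))

-- first-occurrence position used as B's sort key
def pvKey (l : List String) (m : String) : Nat :=
  (PySem.List.index? l m).getD 0

theorem pvIdx_map_fst (u : List String) : (pvIdx u).map (·.1) = u := by
  simp [pvIdx, List.map_map, Function.comp_def, PySem.List.map_snd_enumerate]

theorem pvIdx_length (u : List String) : (pvIdx u).length = u.length := by
  simp [pvIdx, PySem.List.length_enumerate]

theorem pvStep_idx (u : List String) (m : String) :
    pvStep (pvIdx u) m = pvIdx (PySem.Set.add u m) := by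
  by_cases h : m ∈ u
  · simp [pvStep, pvIdx_map_fst, h]
  · rw [PySem.Set.add_of_not_mem h]
    simp only [pvStep, pvIdx_map_fst, pvIdx_length]
    simp [h, pvIdx, PySem.List.enumerate_append, PySem.List.enumerate_cons,
      PySem.List.enumerate_nil]

theorem pvFoldl_step (ms : List String) : ∀ u : List String,
    ms.foldl pvStep (pvIdx u) = pvIdx (ms.foldl PySem.Set.add u) := by
  induction ms with
  | nil => intro u; rfl
  | cons m ms ih => intro u; simp only [List.foldl_cons, pvStep_idx]; exact ih _

-- A's nested fold, flattened
theorem pvFlatten (x : List (String × List (List (String × String)))) :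
    ∀ acc : List (String × Int),
    x.foldl (fun mediaMap t =>
      t.2.foldl (fun mediaMap ln =>
        let media := getMedia ((PySem.Dict.mk ln).getD "news_id" "")
        if (mediaMap.map (·.1)).contains media then mediaMap
        else mediaMap ++ [(media, (mediaMap.length : Int))]) mediaMap) acc
    = (x.flatMap (fun t => t.2.map pvMediaOf)).foldl pvStep acc := by
  induction x with
  | nil => intro acc; rfl
  | cons t x ih =>
    intro acc
    simp only [List.foldl_cons, List.flatMap_cons, List.foldl_append, ih]
    congr 1
    rw [List.foldl_map]
    rfl

-- folding Set.add into an accumulator s keeps s and appends the new firsts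
theorem pvFoldl_add_acc (l : List String) : ∀ s : List String,
    l.foldl PySem.Set.add s
      = s ++ (l.foldl PySem.Set.add []).filter (fun y => !s.contains y) := by
  induction l with
  | nil => intro s; simp
  | cons a l ih =>
    intro s
    have hone : (a :: l).foldl PySem.Set.add [] = a :: (l.foldl PySem.Set.add []).filter (fun y => !(y == a)) := by
      have := ih [a]
      simp only [List.foldl_cons] at this ⊢
      simpa [PySem.Set.add, List.contains_eq_mem] using this
    rw [hone, List.foldl_cons, ih (PySem.Set.add s a)]
    by_cases ha : a ∈ s
    · rw [PySem.Set.add_of_mem ha]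
      have hc : (s.contains a) = true := by simpa [List.contains_eq_mem] using ha
      simp only [List.filter_cons, hc, Bool.not_true, List.filter_filter]
      congr 1
      apply List.filter_congr
      intro y _
      by_cases hya : y = a
      · subst hya; simp [List.contains_eq_mem, ha]
      · simp [hya]
    · rw [PySem.Set.add_of_not_mem ha]
      have hc : (s.contains a) = false := by simpa [List.contains_eq_mem] using ha
      simp only [List.filter_cons, hc, Bool.not_false, List.filter_filter]
      simp only [List.append_assoc, List.singleton_append]
      congr 2
      apply List.filter_congr
      intro y _
      by_cases hya : y = a
      · subst hya; simp [List.contains_eq_mem, ha]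
      · simp [hya, List.contains_eq_mem, Bool.and_comm]

-- set(l) in first-insertion order, one cons step
theorem pvOfList_cons (a : String) (l : List String) :
    PySem.Set.ofList (a :: l)
      = a :: (PySem.Set.ofList l).filter (fun y => !(y == a)) := by
  have h := pvFoldl_add_acc l [a]
  simp only [PySem.Set.ofList_eq_foldl, List.foldl_cons]
  simpa [PySem.Set.add, List.contains_eq_mem] using h

-- the distinct elements in first-insertion order have strictly increasing first positions
theorem pvOfList_pairwise (l : List String) :
    (PySem.Set.ofList l).Pairwise (fun a b => pvKey l a < pvKey l b) := by
  induction l with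
  | nil => simp [PySem.Set.ofList]
  | cons a l ih =>
    rw [pvOfList_cons]
    constructor
    · intro b hb
      have hbmem : b ∈ PySem.Set.ofList l ∧ ¬(b = a) := by
        have := List.of_mem_filter hb
        exact ⟨List.mem_of_mem_filter hb, by simpa using this⟩
      have hbl : b ∈ l := (PySem.Set.mem_ofList _ _).1 hbmem.1
      have hk : PySem.List.index? l b = some ((PySem.List.index? l b).getD 0) := by
        rcases (PySem.List.index?_isSome_iff (xs := l) (v := b)).2 hbl with h
        cases hidx : PySem.List.index? l b with
        | none => rw [hidx] at h; simp at h
        | some k => rfl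
      have hne : a ≠ b := fun h => hbmem.2 h.symm
      simp only [pvKey, PySem.List.index?_cons_self, PySem.List.index?_cons_of_ne _ hne]
      rw [hk]
      simp
    · have hf := List.Pairwise.filter (fun y => !(y == a)) ih
      refine hf.imp_of_mem ?_
      intro b c hb hc hlt
      have hbne : ¬(b = a) := by simpa using List.of_mem_filter hb
      have hcne : ¬(c = a) := by simpa using List.of_mem_filter hc
      have hbl : b ∈ l := (PySem.Set.mem_ofList _ _).1 (List.mem_of_mem_filter hb)
      have hcl : c ∈ l := (PySem.Set.mem_ofList _ _).1 (List.mem_of_mem_filter hc)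
      have hkb : PySem.List.index? l b = some ((PySem.List.index? l b).getD 0) := by
        have h := (PySem.List.index?_isSome_iff (xs := l) (v := b)).2 hbl
        cases hidx : PySem.List.index? l b with
        | none => rw [hidx] at h; simp at h
        | some k => rfl
      have hkc : PySem.List.index? l c = some ((PySem.List.index? l c).getD 0) := by
        have h := (PySem.List.index?_isSome_iff (xs := l) (v := c)).2 hcl
        cases hidx : PySem.List.index? l c with
        | none => rw [hidx] at h; simp at h
        | some k => rfl
      simp only [pvKey, PySem.List.index?_cons_of_ne _ (fun h => hbne h.symm),
        PySem.List.index?_cons_of_ne _ (fun h => hcne h.symm)] at *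
      rw [hkb, hkc]
      simp only [Option.map_some, Option.getD_some]
      omega

-- B's sort is the identity on set(seq): the keys are already strictly increasing
theorem pvSorted_ofList (l : List String) :
    PySem.List.sorted (PySem.Set.ofList l) (fun m => pvKey l m) false
      = PySem.Set.ofList l :=
  PySem.List.sorted_eq_of_perm_of_pairwise_lt _ _ _ (List.Perm.refl _) (pvOfList_pairwise l)

-- ===== VERDICT (by name: the statement is the Claim_ definition above) =====
theorem getMediaMap_spec : Claim_equal_getMediaMap := by
  intro x _ _
  unfold Spec_getMediaMap
  have hA : getMediaMap x = (x.flatMap (fun t => t.2.map pvMediaOf)).foldl pvStep [] := by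
    unfold getMediaMap
    exact pvFlatten x []
  have hB : getMediaMap_alt x
      = pvIdx (PySem.Set.ofList (x.flatMap (fun t => t.2.map pvMediaOf))) := by
    show pvIdx (PySem.List.sorted
        (PySem.Set.ofList (x.flatMap (fun t => t.2.map pvMediaOf)))
        (fun m => pvKey (x.flatMap (fun t => t.2.map pvMediaOf)) m) false) = _
    rw [pvSorted_ofList]
  rw [hA, hB, PySem.Set.ofList_eq_foldl, ← pvFoldl_step _ []]
  rfl
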